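-- pv_equiv track=rewrite | github.com/Tarindra/Saul | saulgpt/legal_rag.py | _expand_query_tokens
-- ===== SOURCE A (Python) =====
-- from typing import Any, Dict, List, Optional, Set
--
-- QUERY_SYNONYMS = {
--     "rent": {"rental", "tenancy", "tenant", "landlord", "lease", "deposit", "eviction"},
--     "salary": {"wage", "wages", "employment", "employer", "employee", "dues", "payslip"},
--     "fraud": {"scam", "cheating", "forgery", "deception"},
--     "property": {"land", "title", "ownership", "deed", "possession", "mutation"},
--     "consumer": {"defect", "service", "refund", "warranty", "replacement"},
--     "family": {"maintenance", "custody", "inheritance", "marriage", "domestic"},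
--     "contract": {"agreement", "breach", "refund", "payment"},
--     "cyber": {"upi", "otp", "phishing", "hacked", "account"},
--     "report": {"draft", "complaint", "summary", "timeline", "evidence", "witness"},
--     "document": {"proof", "evidence", "receipt", "invoice", "agreement", "record"},
--     "witness": {"eyewitness", "saw", "statement", "testimony"},
-- }
--
-- def _expand_query_tokens(tokens: Set[str]) -> Set[str]:
--     expanded = set(tokens)
--     for token in list(tokens):
--         for key, values in QUERY_SYNONYMS.items():
--             if token == key or token in values:
--                 expanded.add(key)
--                 expanded.update(values)
--     return expanded
-- ===== SOURCE B (Python) =====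
-- # Precomputed reverse synonym index: each word of a synonym group maps to the
-- # concatenation of every group (key plus its values) it belongs to, in table order.
-- # Generated once from QUERY_SYNONYMS of saulgpt/legal_rag.py.
-- _SYNONYM_INDEX = {
--     'rent': ['rent', 'rental', 'tenancy', 'tenant', 'landlord', 'lease', 'deposit', 'eviction'],
--     'rental': ['rent', 'rental', 'tenancy', 'tenant', 'landlord', 'lease', 'deposit', 'eviction'],
--     'tenancy': ['rent', 'rental', 'tenancy', 'tenant', 'landlord', 'lease', 'deposit', 'eviction'],
--     'tenant': ['rent', 'rental', 'tenancy', 'tenant', 'landlord', 'lease', 'deposit', 'eviction'],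
--     'landlord': ['rent', 'rental', 'tenancy', 'tenant', 'landlord', 'lease', 'deposit', 'eviction'],
--     'lease': ['rent', 'rental', 'tenancy', 'tenant', 'landlord', 'lease', 'deposit', 'eviction'],
--     'deposit': ['rent', 'rental', 'tenancy', 'tenant', 'landlord', 'lease', 'deposit', 'eviction'],
--     'eviction': ['rent', 'rental', 'tenancy', 'tenant', 'landlord', 'lease', 'deposit', 'eviction'],
--     'salary': ['salary', 'wage', 'wages', 'employment', 'employer', 'employee', 'dues', 'payslip'],
--     'wage': ['salary', 'wage', 'wages', 'employment', 'employer', 'employee', 'dues', 'payslip'],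
--     'wages': ['salary', 'wage', 'wages', 'employment', 'employer', 'employee', 'dues', 'payslip'],
--     'employment': ['salary', 'wage', 'wages', 'employment', 'employer', 'employee', 'dues', 'payslip'],
--     'employer': ['salary', 'wage', 'wages', 'employment', 'employer', 'employee', 'dues', 'payslip'],
--     'employee': ['salary', 'wage', 'wages', 'employment', 'employer', 'employee', 'dues', 'payslip'],
--     'dues': ['salary', 'wage', 'wages', 'employment', 'employer', 'employee', 'dues', 'payslip'],
--     'payslip': ['salary', 'wage', 'wages', 'employment', 'employer', 'employee', 'dues', 'payslip'],
--     'fraud': ['fraud', 'scam', 'cheating', 'forgery', 'deception'],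
--     'scam': ['fraud', 'scam', 'cheating', 'forgery', 'deception'],
--     'cheating': ['fraud', 'scam', 'cheating', 'forgery', 'deception'],
--     'forgery': ['fraud', 'scam', 'cheating', 'forgery', 'deception'],
--     'deception': ['fraud', 'scam', 'cheating', 'forgery', 'deception'],
--     'property': ['property', 'land', 'title', 'ownership', 'deed', 'possession', 'mutation'],
--     'land': ['property', 'land', 'title', 'ownership', 'deed', 'possession', 'mutation'],
--     'title': ['property', 'land', 'title', 'ownership', 'deed', 'possession', 'mutation'],
--     'ownership': ['property', 'land', 'title', 'ownership', 'deed', 'possession', 'mutation'],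
--     'deed': ['property', 'land', 'title', 'ownership', 'deed', 'possession', 'mutation'],
--     'possession': ['property', 'land', 'title', 'ownership', 'deed', 'possession', 'mutation'],
--     'mutation': ['property', 'land', 'title', 'ownership', 'deed', 'possession', 'mutation'],
--     'consumer': ['consumer', 'defect', 'service', 'refund', 'warranty', 'replacement'],
--     'defect': ['consumer', 'defect', 'service', 'refund', 'warranty', 'replacement'],
--     'service': ['consumer', 'defect', 'service', 'refund', 'warranty', 'replacement'],
--     'refund': ['consumer', 'defect', 'service', 'refund', 'warranty', 'replacement', 'contract', 'agreement', 'breach', 'refund', 'payment'],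
--     'warranty': ['consumer', 'defect', 'service', 'refund', 'warranty', 'replacement'],
--     'replacement': ['consumer', 'defect', 'service', 'refund', 'warranty', 'replacement'],
--     'family': ['family', 'maintenance', 'custody', 'inheritance', 'marriage', 'domestic'],
--     'maintenance': ['family', 'maintenance', 'custody', 'inheritance', 'marriage', 'domestic'],
--     'custody': ['family', 'maintenance', 'custody', 'inheritance', 'marriage', 'domestic'],
--     'inheritance': ['family', 'maintenance', 'custody', 'inheritance', 'marriage', 'domestic'],
--     'marriage': ['family', 'maintenance', 'custody', 'inheritance', 'marriage', 'domestic'],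
--     'domestic': ['family', 'maintenance', 'custody', 'inheritance', 'marriage', 'domestic'],
--     'contract': ['contract', 'agreement', 'breach', 'refund', 'payment'],
--     'agreement': ['contract', 'agreement', 'breach', 'refund', 'payment', 'document', 'proof', 'evidence', 'receipt', 'invoice', 'agreement', 'record'],
--     'breach': ['contract', 'agreement', 'breach', 'refund', 'payment'],
--     'payment': ['contract', 'agreement', 'breach', 'refund', 'payment'],
--     'cyber': ['cyber', 'upi', 'otp', 'phishing', 'hacked', 'account'],
--     'upi': ['cyber', 'upi', 'otp', 'phishing', 'hacked', 'account'],
--     'otp': ['cyber', 'upi', 'otp', 'phishing', 'hacked', 'account'],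
--     'phishing': ['cyber', 'upi', 'otp', 'phishing', 'hacked', 'account'],
--     'hacked': ['cyber', 'upi', 'otp', 'phishing', 'hacked', 'account'],
--     'account': ['cyber', 'upi', 'otp', 'phishing', 'hacked', 'account'],
--     'report': ['report', 'draft', 'complaint', 'summary', 'timeline', 'evidence', 'witness'],
--     'draft': ['report', 'draft', 'complaint', 'summary', 'timeline', 'evidence', 'witness'],
--     'complaint': ['report', 'draft', 'complaint', 'summary', 'timeline', 'evidence', 'witness'],
--     'summary': ['report', 'draft', 'complaint', 'summary', 'timeline', 'evidence', 'witness'],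
--     'timeline': ['report', 'draft', 'complaint', 'summary', 'timeline', 'evidence', 'witness'],
--     'evidence': ['report', 'draft', 'complaint', 'summary', 'timeline', 'evidence', 'witness', 'document', 'proof', 'evidence', 'receipt', 'invoice', 'agreement', 'record'],
--     'witness': ['report', 'draft', 'complaint', 'summary', 'timeline', 'evidence', 'witness', 'witness', 'eyewitness', 'saw', 'statement', 'testimony'],
--     'document': ['document', 'proof', 'evidence', 'receipt', 'invoice', 'agreement', 'record'],
--     'proof': ['document', 'proof', 'evidence', 'receipt', 'invoice', 'agreement', 'record'],
--     'receipt': ['document', 'proof', 'evidence', 'receipt', 'invoice', 'agreement', 'record'],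
--     'invoice': ['document', 'proof', 'evidence', 'receipt', 'invoice', 'agreement', 'record'],
--     'record': ['document', 'proof', 'evidence', 'receipt', 'invoice', 'agreement', 'record'],
--     'eyewitness': ['witness', 'eyewitness', 'saw', 'statement', 'testimony'],
--     'saw': ['witness', 'eyewitness', 'saw', 'statement', 'testimony'],
--     'statement': ['witness', 'eyewitness', 'saw', 'statement', 'testimony'],
--     'testimony': ['witness', 'eyewitness', 'saw', 'statement', 'testimony'],
-- }
--
-- def _expand_query_tokens(tokens):
--     extra = [w for t in tokens for w in _SYNONYM_INDEX.get(t, ())]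
--     expanded = set(tokens)
--     expanded.update(extra)
--     return expanded
-- ===== Notes on version B (the rewrite author's own statement) =====
-- stated objective: faster
-- what changed: Replaces the per-token scan over all 11 QUERY_SYNONYMS entries (equality plus set-membership test each) by a single lookup per token in a precomputed reverse synonym index, collecting all expansions into one list and performing a single bulk set update.
import Mathlib
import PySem

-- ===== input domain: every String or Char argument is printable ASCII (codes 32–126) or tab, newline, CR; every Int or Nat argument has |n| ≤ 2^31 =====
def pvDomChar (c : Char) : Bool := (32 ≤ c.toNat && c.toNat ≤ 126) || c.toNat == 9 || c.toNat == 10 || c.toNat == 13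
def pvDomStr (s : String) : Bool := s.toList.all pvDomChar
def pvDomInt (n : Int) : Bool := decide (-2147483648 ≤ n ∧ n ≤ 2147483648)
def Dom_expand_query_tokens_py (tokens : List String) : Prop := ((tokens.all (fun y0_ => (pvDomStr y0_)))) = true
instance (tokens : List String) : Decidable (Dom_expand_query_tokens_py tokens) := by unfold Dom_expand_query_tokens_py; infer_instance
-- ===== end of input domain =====

-- B replaces A's per-token scan over QUERY_SYNONYMS by one lookup per token in a precomputed
-- reverse synonym index, gathering all expansions into one list and doing a single set update
-- (alternative decomposition; return-value equivalence, neither program mutates its argument).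


-- ===== PORT A =====
-- QUERY_SYNONYMS, in dict insertion order (values in literal order; consumed only set-wise)
def pvSyn : List (String × List String) := [
  ("rent", ["rental", "tenancy", "tenant", "landlord", "lease", "deposit", "eviction"]),
  ("salary", ["wage", "wages", "employment", "employer", "employee", "dues", "payslip"]),
  ("fraud", ["scam", "cheating", "forgery", "deception"]),
  ("property", ["land", "title", "ownership", "deed", "possession", "mutation"]),
  ("consumer", ["defect", "service", "refund", "warranty", "replacement"]),
  ("family", ["maintenance", "custody", "inheritance", "marriage", "domestic"]),
  ("contract", ["agreement", "breach", "refund", "payment"]),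
  ("cyber", ["upi", "otp", "phishing", "hacked", "account"]),
  ("report", ["draft", "complaint", "summary", "timeline", "evidence", "witness"]),
  ("document", ["proof", "evidence", "receipt", "invoice", "agreement", "record"]),
  ("witness", ["eyewitness", "saw", "statement", "testimony"])]

def expand_query_tokens_py (tokens : List String) : List String :=
  tokens.foldl
    (fun expanded token =>
      pvSyn.foldl
        (fun expanded kv =>
          if token == kv.1 || kv.2.contains token then
            kv.2.foldl PySem.Set.add (PySem.Set.add expanded kv.1)
          else expanded)
        expanded)
    (PySem.Set.ofList tokens)

-- ===== PORT B =====
-- _SYNONYM_INDEX of Source B: the precomputed reverse index, a literal dict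
def pvIdx : PySem.Dict String (List String) := PySem.Dict.mk [
  ("rent", ["rent", "rental", "tenancy", "tenant", "landlord", "lease", "deposit", "eviction"]),
  ("rental", ["rent", "rental", "tenancy", "tenant", "landlord", "lease", "deposit", "eviction"]),
  ("tenancy", ["rent", "rental", "tenancy", "tenant", "landlord", "lease", "deposit", "eviction"]),
  ("tenant", ["rent", "rental", "tenancy", "tenant", "landlord", "lease", "deposit", "eviction"]),
  ("landlord", ["rent", "rental", "tenancy", "tenant", "landlord", "lease", "deposit", "eviction"]),
  ("lease", ["rent", "rental", "tenancy", "tenant", "landlord", "lease", "deposit", "eviction"]),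
  ("deposit", ["rent", "rental", "tenancy", "tenant", "landlord", "lease", "deposit", "eviction"]),
  ("eviction", ["rent", "rental", "tenancy", "tenant", "landlord", "lease", "deposit", "eviction"]),
  ("salary", ["salary", "wage", "wages", "employment", "employer", "employee", "dues", "payslip"]),
  ("wage", ["salary", "wage", "wages", "employment", "employer", "employee", "dues", "payslip"]),
  ("wages", ["salary", "wage", "wages", "employment", "employer", "employee", "dues", "payslip"]),
  ("employment", ["salary", "wage", "wages", "employment", "employer", "employee", "dues", "payslip"]),
  ("employer", ["salary", "wage", "wages", "employment", "employer", "employee", "dues", "payslip"]),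
  ("employee", ["salary", "wage", "wages", "employment", "employer", "employee", "dues", "payslip"]),
  ("dues", ["salary", "wage", "wages", "employment", "employer", "employee", "dues", "payslip"]),
  ("payslip", ["salary", "wage", "wages", "employment", "employer", "employee", "dues", "payslip"]),
  ("fraud", ["fraud", "scam", "cheating", "forgery", "deception"]),
  ("scam", ["fraud", "scam", "cheating", "forgery", "deception"]),
  ("cheating", ["fraud", "scam", "cheating", "forgery", "deception"]),
  ("forgery", ["fraud", "scam", "cheating", "forgery", "deception"]),
  ("deception", ["fraud", "scam", "cheating", "forgery", "deception"]),
  ("property", ["property", "land", "title", "ownership", "deed", "possession", "mutation"]),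
  ("land", ["property", "land", "title", "ownership", "deed", "possession", "mutation"]),
  ("title", ["property", "land", "title", "ownership", "deed", "possession", "mutation"]),
  ("ownership", ["property", "land", "title", "ownership", "deed", "possession", "mutation"]),
  ("deed", ["property", "land", "title", "ownership", "deed", "possession", "mutation"]),
  ("possession", ["property", "land", "title", "ownership", "deed", "possession", "mutation"]),
  ("mutation", ["property", "land", "title", "ownership", "deed", "possession", "mutation"]),
  ("consumer", ["consumer", "defect", "service", "refund", "warranty", "replacement"]),
  ("defect", ["consumer", "defect", "service", "refund", "warranty", "replacement"]),
  ("service", ["consumer", "defect", "service", "refund", "warranty", "replacement"]),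
  ("refund", ["consumer", "defect", "service", "refund", "warranty", "replacement", "contract", "agreement", "breach", "refund", "payment"]),
  ("warranty", ["consumer", "defect", "service", "refund", "warranty", "replacement"]),
  ("replacement", ["consumer", "defect", "service", "refund", "warranty", "replacement"]),
  ("family", ["family", "maintenance", "custody", "inheritance", "marriage", "domestic"]),
  ("maintenance", ["family", "maintenance", "custody", "inheritance", "marriage", "domestic"]),
  ("custody", ["family", "maintenance", "custody", "inheritance", "marriage", "domestic"]),
  ("inheritance", ["family", "maintenance", "custody", "inheritance", "marriage", "domestic"]),
  ("marriage", ["family", "maintenance", "custody", "inheritance", "marriage", "domestic"]),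
  ("domestic", ["family", "maintenance", "custody", "inheritance", "marriage", "domestic"]),
  ("contract", ["contract", "agreement", "breach", "refund", "payment"]),
  ("agreement", ["contract", "agreement", "breach", "refund", "payment", "document", "proof", "evidence", "receipt", "invoice", "agreement", "record"]),
  ("breach", ["contract", "agreement", "breach", "refund", "payment"]),
  ("payment", ["contract", "agreement", "breach", "refund", "payment"]),
  ("cyber", ["cyber", "upi", "otp", "phishing", "hacked", "account"]),
  ("upi", ["cyber", "upi", "otp", "phishing", "hacked", "account"]),
  ("otp", ["cyber", "upi", "otp", "phishing", "hacked", "account"]),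
  ("phishing", ["cyber", "upi", "otp", "phishing", "hacked", "account"]),
  ("hacked", ["cyber", "upi", "otp", "phishing", "hacked", "account"]),
  ("account", ["cyber", "upi", "otp", "phishing", "hacked", "account"]),
  ("report", ["report", "draft", "complaint", "summary", "timeline", "evidence", "witness"]),
  ("draft", ["report", "draft", "complaint", "summary", "timeline", "evidence", "witness"]),
  ("complaint", ["report", "draft", "complaint", "summary", "timeline", "evidence", "witness"]),
  ("summary", ["report", "draft", "complaint", "summary", "timeline", "evidence", "witness"]),
  ("timeline", ["report", "draft", "complaint", "summary", "timeline", "evidence", "witness"]),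
  ("evidence", ["report", "draft", "complaint", "summary", "timeline", "evidence", "witness", "document", "proof", "evidence", "receipt", "invoice", "agreement", "record"]),
  ("witness", ["report", "draft", "complaint", "summary", "timeline", "evidence", "witness", "witness", "eyewitness", "saw", "statement", "testimony"]),
  ("document", ["document", "proof", "evidence", "receipt", "invoice", "agreement", "record"]),
  ("proof", ["document", "proof", "evidence", "receipt", "invoice", "agreement", "record"]),
  ("receipt", ["document", "proof", "evidence", "receipt", "invoice", "agreement", "record"]),
  ("invoice", ["document", "proof", "evidence", "receipt", "invoice", "agreement", "record"]),
  ("record", ["document", "proof", "evidence", "receipt", "invoice", "agreement", "record"]),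
  ("eyewitness", ["witness", "eyewitness", "saw", "statement", "testimony"]),
  ("saw", ["witness", "eyewitness", "saw", "statement", "testimony"]),
  ("statement", ["witness", "eyewitness", "saw", "statement", "testimony"]),
  ("testimony", ["witness", "eyewitness", "saw", "statement", "testimony"])]

-- extra = [w for t in tokens for w in _SYNONYM_INDEX.get(t, ())]; expanded = set(tokens); expanded.update(extra)
def expand_query_tokens_py_alt (ts : List String) : List String :=
  let extra := ts.flatMap (fun t => pvIdx.getD t [])
  PySem.Set.update (PySem.Set.ofList ts) extra

-- ===== PRECONDITION & SPEC =====
def Spec_expand_query_tokens_py (tokens : List String) (out : List String) : Prop := out = expand_query_tokens_py_alt tokens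
instance (tokens : List String) (out : List String) : Decidable (Spec_expand_query_tokens_py tokens out) := by unfold Spec_expand_query_tokens_py; infer_instance

-- ===== CLAIM (what is proved, stated in full; the proofs are below) =====
def Claim_equal_expand_query_tokens_py : Prop := ∀ (tokens : List String), Dom_expand_query_tokens_py tokens → Spec_expand_query_tokens_py tokens (expand_query_tokens_py tokens)

-- ===== LEMMAS AND PROOFS =====

-- the group of a table entry: its key followed by its values
def pvGroup (kv : String × List String) : List String := kv.1 :: kv.2

-- the per-token expansion list: concatenation of every group the token belongs to, in table order
def pvExp (entries : List (String × List String)) (t : String) : List String :=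
  entries.flatMap (fun kv => if t ∈ pvGroup kv then pvGroup kv else [])

-- every value stored in the literal index is exactly the table-order expansion of its key
set_option maxRecDepth 8000 in
theorem pvIdx_values_correct : pvIdx.keys.all (fun w => pvIdx.getD w [] == pvExp pvSyn w) = true := by decide

-- every word of every synonym group is a key of the literal index
set_option maxRecDepth 8000 in
theorem pvIdx_keys_complete : pvSyn.all (fun kv => (pvGroup kv).all (fun w => pvIdx.contains w)) = true := by decide

-- the index lookup of Source B computes the table-order expansion of any token
theorem pvIdx_getD (t : String) : pvIdx.getD t [] = pvExp pvSyn t := by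
  by_cases h : pvIdx.contains t = true
  · have hk : t ∈ pvIdx.keys := (PySem.Dict.contains_iff_mem_keys pvIdx t).mp h
    have := (List.all_eq_true.mp pvIdx_values_correct) t hk
    exact eq_of_beq this
  · rw [PySem.Dict.getD_of_not_contains (d := pvIdx) (k := t) (d0 := []) (h := Bool.eq_false_iff.mpr h)]
    have hall := List.all_eq_true.mp pvIdx_keys_complete
    have : ∀ kv ∈ pvSyn, t ∉ pvGroup kv := by
      intro kv hkv hmem
      exact h (List.all_eq_true.mp (hall kv hkv) t hmem)
    symm
    simp only [pvExp, List.flatMap_eq_nil_iff]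
    intro kv hkv
    simp [this kv hkv]

-- A's inner loop over the table equals folding Set.add over the expansion list
theorem pvA_inner (t : String) : ∀ (entries : List (String × List String)) (s : PySem.Set String),
    entries.foldl
      (fun expanded kv =>
        if t == kv.1 || kv.2.contains t then
          kv.2.foldl PySem.Set.add (PySem.Set.add expanded kv.1)
        else expanded) s
    = List.foldl PySem.Set.add s (pvExp entries t) := by
  intro entries
  induction entries with
  | nil => intro s; simp [pvExp]
  | cons kv es ih =>
      intro s
      simp only [List.foldl_cons, pvExp, List.flatMap_cons, List.foldl_append]
      rw [← pvExp]
      by_cases hm : t ∈ pvGroup kv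
      · have hb : (t == kv.1 || kv.2.contains t) = true := by
          simp only [pvGroup, List.mem_cons] at hm
          rcases hm with h | h
          · simp [h]
          · simp [h]
        rw [hb, ih, if_pos hm]
        rfl
      · have hb : (t == kv.1 || kv.2.contains t) = false := by
          simp only [pvGroup, List.mem_cons, not_or] at hm
          simp [hm.1, hm.2]
        rw [hb, ih, if_neg hm]
        simp

-- ===== VERDICT (by name: the statement is the Claim_ definition above) =====
theorem expand_query_tokens_py_spec : Claim_equal_expand_query_tokens_py := by
  intro tokens _
  unfold Spec_expand_query_tokens_py expand_query_tokens_py expand_query_tokens_py_alt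
  simp only [pvIdx_getD, PySem.Set.update, List.foldl_flatMap]
  have hstep : (fun (expanded : PySem.Set String) (token : String) =>
      pvSyn.foldl
        (fun expanded kv =>
          if token == kv.1 || kv.2.contains token then
            kv.2.foldl PySem.Set.add (PySem.Set.add expanded kv.1)
          else expanded)
        expanded)
      = fun s t => List.foldl PySem.Set.add s (pvExp pvSyn t) := by
    funext s t
    exact pvA_inner t pvSyn s
  rw [hstep]
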